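-- pv_equiv track=rewrite | github.com/ViniciusBessa/criptografias | lib_gui/codificadores.py | cod_tapcode
-- ===== SOURCE A (Python) =====
-- from string import ascii_uppercase
--
-- def cod_tapcode(mensagem: str, tipo_saida: int) -> str:
--     # Tabela do tap code
--     """Função para codificar em tap code"""
--     tabela: list = [['A', 'B', 'C', 'D', 'E'],
--                     ['F', 'G', 'H', 'I', 'J'],
--                     ['L', 'M', 'N', 'O', 'P'],
--                     ['Q', 'R', 'S', 'T', 'U'],
--                     ['V', 'W', 'X', 'Y', 'Z']]
--
--     if tipo_saida == 0 or tipo_saida == 1: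
--         mensagem: list = [x.upper() for x in mensagem if x.upper() in ascii_uppercase]
--         for indice_msg, letra in enumerate(mensagem):
--             for indice_lin, linha in enumerate(tabela):
--                 if letra in linha:
--                     mensagem[indice_msg] = ','.join([str(indice_lin + 1), str(linha.index(letra) + 1)])
--         if tipo_saida == 1:
--             for indice, conjunto in enumerate(mensagem):
--                 lista = conjunto.split(',')
--                 mensagem[indice] = ' '.join(['.' * int(x) for x in lista])
--         return '  '.join(mensagem)
--     return 'Selecione uma das opções de codificação.'
-- ===== SOURCE B (Python) =====
-- from string import ascii_uppercase
--
-- def cod_tapcode(mensagem: str, tipo_saida: int) -> str: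
--     """Tap-code encoder: one pass, divmod on a flat alphabet instead of scanning table rows."""
--     if tipo_saida != 0 and tipo_saida != 1:
--         return 'Selecione uma das opções de codificação.'
--     flat = 'ABCDEFGHIJLMNOPQRSTUVWXYZ'  # 5x5 table flattened (no K)
--     tokens = []
--     for ch in mensagem:
--         u = ch.upper()
--         if u not in ascii_uppercase:
--             continue
--         i = flat.find(u)
--         if i < 0:  # 'K' has no cell: keep it literally
--             tokens.append(u)
--         else:
--             row, col = divmod(i, 5)
--             if tipo_saida == 1:
--                 tokens.append('.' * (row + 1) + ' ' + '.' * (col + 1))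
--             else:
--                 tokens.append(f'{row + 1},{col + 1}')
--     return '  '.join(tokens)
-- ===== Notes on version B (the rewrite author's own statement) =====
-- stated objective: simpler
-- what changed: B makes a single pass over the message mapping each letter by divmod on its index in a flat 25-letter alphabet, replacing A's nested row-scanning loops and its separate second rewrite pass for the dot output.
import Mathlib
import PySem

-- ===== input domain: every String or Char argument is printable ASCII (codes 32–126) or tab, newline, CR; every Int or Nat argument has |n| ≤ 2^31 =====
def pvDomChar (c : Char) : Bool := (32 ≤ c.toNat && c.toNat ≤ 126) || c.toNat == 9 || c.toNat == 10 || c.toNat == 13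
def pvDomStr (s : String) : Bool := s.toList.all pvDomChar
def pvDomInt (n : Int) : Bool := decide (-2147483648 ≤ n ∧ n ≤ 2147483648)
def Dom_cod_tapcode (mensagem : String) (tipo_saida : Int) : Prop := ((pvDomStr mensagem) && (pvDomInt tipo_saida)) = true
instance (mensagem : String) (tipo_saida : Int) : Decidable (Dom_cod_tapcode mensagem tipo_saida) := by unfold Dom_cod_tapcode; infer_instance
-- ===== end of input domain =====

-- B replaces A's nested row-scans and second rewrite pass by one pass with divmod on a flat alphabet (objective: simpler).
-- A raises ValueError on tipo_saida == 1 when the message contains 'K'/'k'; those inputs are outside Pre_.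


-- ===== PORT A =====
-- Python strings are modelled as List Char; the final result is rebuilt with String.ofList.
def pvAsciiUpperA : List Char := ['A','B','C','D','E','F','G','H','I','J','K','L','M','N','O','P','Q','R','S','T','U','V','W','X','Y','Z']

-- the 5x5 table: each row a list of single-character strings, as in A
def pvTabelaA : List (List (List Char)) :=
  [[['A'],['B'],['C'],['D'],['E']],
   [['F'],['G'],['H'],['I'],['J']],
   [['L'],['M'],['N'],['O'],['P']],
   [['Q'],['R'],['S'],['T'],['U']],
   [['V'],['W'],['X'],['Y'],['Z']]]

-- the inner 'for indice_lin, linha in enumerate(tabela): if letra in linha: mensagem[i] = …' loop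
-- (.getD 0 on index? is guarded by the membership test, exactly as linha.index(letra) is in A)
def pvPhase2A (letra : List Char) : List Char :=
  (PySem.List.enumerate pvTabelaA).foldl
    (fun acc p =>
      if letra ∈ p.2 then
        PySem.Chars.join [','] [PySem.Int.toChars ((p.1 : Int) + 1),
                                PySem.Int.toChars (((PySem.List.index? p.2 letra).getD 0 : Int) + 1)]
      else acc)
    letra

-- the tipo_saida == 1 rewrite: conjunto.split(',') then '.'*int(x); int('K') is a ValueError in
-- Python, i.e. ofChars? = none — that case is excluded by Pre_ (the [] result is never claimed)
def pvPhase3A (conjunto : List Char) : List Char :=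
  PySem.Chars.join [' ']
    ((PySem.Chars.splitOn conjunto [',']).map
      (fun x => match PySem.Int.ofChars? x with
        | some n => List.replicate n.toNat '.'
        | none => []))

def cod_tapcode (mensagem : String) (tipo_saida : Int) : String :=
  if tipo_saida = 0 ∨ tipo_saida = 1 then
    let msg1 : List (List Char) :=
      (mensagem.toList.filter (fun c => PySem.Chars.upperChar c ∈ pvAsciiUpperA)).map
        (fun c => [PySem.Chars.upperChar c])
    let msg2 := msg1.map pvPhase2A
    let msg3 := if tipo_saida = 1 then msg2.map pvPhase3A else msg2
    String.ofList (PySem.Chars.join [' ',' '] msg3)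
  else "Selecione uma das opções de codificação."

-- ===== PORT B =====
def pvAsciiUpperB : List Char := ['A','B','C','D','E','F','G','H','I','J','K','L','M','N','O','P','Q','R','S','T','U','V','W','X','Y','Z']

def pvFlatB : List Char := ['A','B','C','D','E','F','G','H','I','J','L','M','N','O','P','Q','R','S','T','U','V','W','X','Y','Z']

-- token for one kept uppercase letter u (the body of B's loop after the 'continue' test)
def pvCellB (tipo_saida : Int) (u : Char) : List Char :=
  let i := PySem.Chars.find pvFlatB [u]
  if i < 0 then [u]
  else
    let row := PySem.Int.floordiv i 5
    let col := PySem.Int.mod i 5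
    if tipo_saida = 1 then
      List.replicate (row + 1).toNat '.' ++ [' '] ++ List.replicate (col + 1).toNat '.'
    else
      PySem.Int.toChars (row + 1) ++ [','] ++ PySem.Int.toChars (col + 1)

def pvTokB (tipo_saida : Int) (c : Char) : Option (List Char) :=
  let u := PySem.Chars.upperChar c
  if u ∈ pvAsciiUpperB then some (pvCellB tipo_saida u) else none

def cod_tapcode_alt (mensagem : String) (tipo_saida : Int) : String :=
  if tipo_saida ≠ 0 ∧ tipo_saida ≠ 1 then "Selecione uma das opções de codificação."
  else String.ofList (PySem.Chars.join [' ',' '] (mensagem.toList.filterMap (pvTokB tipo_saida)))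

-- ===== PRECONDITION & SPEC =====
-- Pre_ excludes exactly the inputs where A raises: tipo_saida == 1 with a 'K'/'k' in the message
-- (int('K') is a ValueError in A's second pass).
def Pre_cod_tapcode (mensagem : String) (tipo_saida : Int) : Prop :=
  tipo_saida = 1 → ('K' ∉ mensagem.toList ∧ 'k' ∉ mensagem.toList)
instance (mensagem : String) (tipo_saida : Int) : Decidable (Pre_cod_tapcode mensagem tipo_saida) := by
  unfold Pre_cod_tapcode; infer_instance

def pvWitness_cod_tapcode : String × Int := ("Hello, World!", 1)

def Spec_cod_tapcode (mensagem : String) (tipo_saida : Int) (out : String) : Prop := out = cod_tapcode_alt mensagem tipo_saida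
instance (mensagem : String) (tipo_saida : Int) (out : String) : Decidable (Spec_cod_tapcode mensagem tipo_saida out) := by unfold Spec_cod_tapcode; infer_instance

-- ===== CLAIM (what is proved, stated in full; the proofs are below) =====
def Claim_equal_cod_tapcode : Prop := ∀ (mensagem : String) (tipo_saida : Int), Dom_cod_tapcode mensagem tipo_saida → Pre_cod_tapcode mensagem tipo_saida → Spec_cod_tapcode mensagem tipo_saida (cod_tapcode mensagem tipo_saida)


-- ===== LEMMAS AND PROOFS =====

-- A's per-letter chain equals B's per-letter token, for tipo_saida = 0 (all 26 letters)
theorem pvCell0 (u : Char) (hu : u ∈ pvAsciiUpperA) : pvPhase2A [u] = pvCellB 0 u := by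
  fin_cases hu <;> decide

-- … and for tipo_saida = 1, on the 25 letters other than 'K'
theorem pvCell1 (u : Char) (hu : u ∈ pvAsciiUpperA) (hK : u ≠ 'K') :
    pvPhase3A (pvPhase2A [u]) = pvCellB 1 u := by
  fin_cases hu <;> first | decide | exact absurd rfl hK

theorem pvUpper_eq_K (c : Char) (h : PySem.Chars.upperChar c = 'K') : c = 'K' ∨ c = 'k' := by
  unfold PySem.Chars.upperChar at h
  split_ifs at h with hl
  · right
    unfold PySem.Chars.islower at hl
    simp only [Bool.and_eq_true, decide_eq_true_eq, Char.le_def] at hl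
    have hlo : 97 ≤ c.toNat := hl.1
    have hhi : c.toNat ≤ 122 := hl.2
    have h1 : c.toNat - 32 = 75 := by
      have hv : (c.toNat - 32).isValidChar := by constructor; omega
      have h2 := congrArg Char.toNat h
      rw [Char.toNat_ofNat, if_pos hv] at h2
      simpa using h2
    have h3 : c.toNat = 107 := by omega
    have h107 : ('k' : Char).toNat = 107 := rfl
    exact Char.ext (UInt32.toNat_inj.mp (h3.trans h107.symm))
  · left; exact h

theorem pvFilterMapB (tipo_saida : Int) (l : List Char)
    (h : tipo_saida = 1 → ∀ c ∈ l, c ≠ 'K' ∧ c ≠ 'k') (f : List Char → List Char)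
    (hf : ∀ u, u ∈ pvAsciiUpperA → (tipo_saida = 1 → u ≠ 'K') → f [u] = pvCellB tipo_saida u) :
    ((l.filter (fun c => PySem.Chars.upperChar c ∈ pvAsciiUpperA)).map
        (fun c => [PySem.Chars.upperChar c])).map f
      = l.filterMap (pvTokB tipo_saida) := by
  induction l with
  | nil => rfl
  | cons c t ih =>
    have ht : tipo_saida = 1 → ∀ x ∈ t, x ≠ 'K' ∧ x ≠ 'k' := by
      intro h1 x hx; exact h h1 x (List.mem_cons_of_mem _ hx)
    simp only [List.filter_cons, List.filterMap_cons, pvTokB]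
    by_cases hm : PySem.Chars.upperChar c ∈ pvAsciiUpperA
    · have hm' : PySem.Chars.upperChar c ∈ pvAsciiUpperB := hm
      simp only [hm, hm', decide_true, if_pos, List.map_cons, ih ht]
      congr 1
      apply hf _ hm
      intro h1 hKu
      rcases pvUpper_eq_K _ hKu with h' | h' <;>
        [exact (h h1 c List.mem_cons_self).1 h'; exact (h h1 c List.mem_cons_self).2 h']
    · have hm' : PySem.Chars.upperChar c ∉ pvAsciiUpperB := hm
      simp only [hm, hm', decide_false, ite_false]
      exact ih ht

-- ===== VERDICT (by name: the statement is the Claim_ definition above) =====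
theorem cod_tapcode_spec : Claim_equal_cod_tapcode := by
  intro mensagem tipo_saida _ hpre
  unfold Spec_cod_tapcode cod_tapcode cod_tapcode_alt
  by_cases h0 : tipo_saida = 0
  · subst h0
    simp only [if_neg (by simp : ¬((0:Int) ≠ 0 ∧ (0:Int) ≠ 1)), if_neg (by decide : ¬(0:Int) = 1)]
    rw [← pvFilterMapB 0 mensagem.toList (by simp) pvPhase2A (fun u hu _ => pvCell0 u hu)]
    simp [List.map_map, Function.comp_def]
  · by_cases h1 : tipo_saida = 1
    · subst h1
      have hk := hpre rfl
      simp only [if_neg (by simp : ¬((1:Int) ≠ 0 ∧ (1:Int) ≠ 1))]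
      rw [← pvFilterMapB 1 mensagem.toList
            (fun _ x hx => ⟨fun hK => hk.1 (hK ▸ hx), fun hK => hk.2 (hK ▸ hx)⟩)
            (fun s => pvPhase3A (pvPhase2A s))
            (fun u hu hK => pvCell1 u hu (hK rfl))]
      simp [List.map_map, Function.comp_def]
    · rw [if_neg (by tauto), if_pos ⟨h0, h1⟩]
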